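-- pv_equiv track=rewrite | github.com/flowmari/TreasureRun-Spigot-Plugin | scripts/fix_duplicate_command_blocks.py | split_command_children
-- ===== SOURCE A (Python) =====
-- def split_command_children(section_lines):
--     """
--     command: 配下の 2スペース indent の子ブロック単位で分割
--     """
--     header = section_lines[0]
--     body = section_lines[1:]
--
--     children = []
--     current_key = None
--     current_block = []
--
--     for line in body:
--         if line.startswith("  ") and not line.startswith("    ") and line.rstrip().endswith(":"):
--             if current_key is not None:
--                 children.append((current_key, current_block))
--             current_key = line.strip()[:-1]
--             current_block = [line]
--         else:
--             if current_key is None: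
--                 # command: 直下にぶら下がる予期しない行
--                 current_key = "__loose__"
--                 current_block = []
--             current_block.append(line)
--
--     if current_key is not None:
--         children.append((current_key, current_block))
--
--     return header, children
-- ===== SOURCE B (Python) =====
-- def _is_boundary(line):
--     return line.startswith("  ") and not line.startswith("    ") and line.rstrip().endswith(":")
--
--
-- def _span_non_boundary(lines):
--     """(longest prefix of non-boundary lines, rest)."""
--     i = 0
--     while i < len(lines) and not _is_boundary(lines[i]):
--         i += 1
--     return lines[:i], lines[i:]
--
--
-- def _blocks(lines):
--     """lines starts with a boundary line (or is empty): recursive span-split."""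
--     if not lines:
--         return []
--     head, rest = lines[0], lines[1:]
--     blk, remainder = _span_non_boundary(rest)
--     return [(head.strip()[:-1], [head] + blk)] + _blocks(remainder)
--
--
-- def split_command_children(section_lines):
--     header = section_lines[0]
--     body = section_lines[1:]
--     loose, rest = _span_non_boundary(body)
--     prefix = [("__loose__", loose)] if loose else []
--     return header, prefix + _blocks(rest)
-- ===== Notes on version B (the rewrite author's own statement) =====
-- stated objective: alternative
-- what changed: Replaces A's single accumulator-state loop (children/current_key/current_block mutated per line) with a recursive span decomposition: take the non-boundary prefix as the optional __loose__ block, then recursively split the remainder at boundary lines into slices.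
import Mathlib
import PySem

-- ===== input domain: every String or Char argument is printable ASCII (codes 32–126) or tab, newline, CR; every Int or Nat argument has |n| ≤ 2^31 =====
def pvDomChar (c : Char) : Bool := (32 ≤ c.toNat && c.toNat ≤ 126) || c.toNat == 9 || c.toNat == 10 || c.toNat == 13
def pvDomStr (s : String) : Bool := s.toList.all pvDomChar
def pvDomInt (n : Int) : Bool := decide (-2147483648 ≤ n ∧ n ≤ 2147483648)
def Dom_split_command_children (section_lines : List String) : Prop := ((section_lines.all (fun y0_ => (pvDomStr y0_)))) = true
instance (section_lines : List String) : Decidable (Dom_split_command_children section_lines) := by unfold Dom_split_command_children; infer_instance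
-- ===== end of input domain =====

-- B is an alternative decomposition (recursive span-splitting at boundary lines) of A's
-- accumulator loop; equivalence is claimed on non-empty input (A raises IndexError on []).

-- shared helper: the boundary test `line.startswith("  ") and not line.startswith("    ") and line.rstrip().endswith(":")`
def pvIsBoundary (line : String) : Bool :=
  PySem.Str.startswith line "  " && !PySem.Str.startswith line "    "
    && PySem.Str.endswith (PySem.Str.rstrip line) ":"

-- `line.strip()[:-1]`
def pvKey (line : String) : String :=
  PySem.Str.slice (PySem.Str.strip line) none (some (-1))

-- ===== PORT A =====
-- loop state: (children, current_key, current_block)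
def pvStepA (st : List (String × List String) × Option String × List String) (line : String) :
    List (String × List String) × Option String × List String :=
  if pvIsBoundary line then
    match st.2.1 with
    | some k => (st.1 ++ [(k, st.2.2)], some (pvKey line), [line])
    | none => (st.1, some (pvKey line), [line])
  else
    match st.2.1 with
    | some k => (st.1, some k, st.2.2 ++ [line])
    | none => (st.1, some "__loose__", [] ++ [line])

def split_command_children (section_lines : List String) : String × (List (String × List String)) :=
  match section_lines with
  | [] => ("", [])  -- unreachable: Python raises IndexError on []; excluded by Pre_
  | header :: body =>
    let st := body.foldl pvStepA ([], none, [])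
    let children :=
      match st.2.1 with
      | some k => st.1 ++ [(k, st.2.2)]
      | none => st.1
    (header, children)

-- ===== PORT B =====
-- `_blocks`: input starts with a boundary line (or is empty); recursive span-split
def pvBlocks (lines : List String) : List (String × List String) :=
  match lines with
  | [] => []
  | head :: rest =>
    (pvKey head, head :: rest.takeWhile (fun l => !pvIsBoundary l))
      :: pvBlocks (rest.dropWhile (fun l => !pvIsBoundary l))
termination_by lines.length
decreasing_by
  simp only [List.length_cons]
  exact Nat.lt_succ_of_le (List.length_dropWhile_le _ _)

def split_command_children_alt (section_lines : List String) : String × (List (String × List String)) :=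
  match section_lines with
  | [] => ("", [])  -- unreachable: Python raises IndexError on []; excluded by Pre_
  | header :: body =>
    let loose := body.takeWhile (fun l => !pvIsBoundary l)
    let rest := body.dropWhile (fun l => !pvIsBoundary l)
    let loosePrefix := if loose ≠ [] then [("__loose__", loose)] else []
    (header, loosePrefix ++ pvBlocks rest)

-- ===== PRECONDITION & SPEC =====
-- Pre_ excludes the empty list, on which both Pythons raise IndexError (section_lines[0]).
def Pre_split_command_children (section_lines : List String) : Prop := section_lines ≠ []
instance (section_lines : List String) : Decidable (Pre_split_command_children section_lines) := by
  unfold Pre_split_command_children; infer_instance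

def pvWitness_split_command_children : List String := ["command:", "  run:", "  - say hi"]

def Spec_split_command_children (section_lines : List String) (out : String × (List (String × List String))) : Prop := out = split_command_children_alt section_lines
instance (section_lines : List String) (out : String × (List (String × List String))) : Decidable (Spec_split_command_children section_lines out) := by unfold Spec_split_command_children; infer_instance

-- ===== CLAIM (what is proved, stated in full; the proofs are below) =====
def Claim_equal_split_command_children : Prop := ∀ (section_lines : List String), Dom_split_command_children section_lines → Pre_split_command_children section_lines → Spec_split_command_children section_lines (split_command_children section_lines)

-- ===== LEMMAS AND PROOFS =====

-- A's loop from a flushed-open state (some k, blk) produces k's block extended by the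
-- non-boundary prefix, then B's recursive blocks of the remainder.
theorem foldlA_some (body : List String) :
    ∀ (cs : List (String × List String)) (k : String) (blk : List String),
    (let st := body.foldl pvStepA (cs, some k, blk)
     match st.2.1 with
     | some k' => st.1 ++ [(k', st.2.2)]
     | none => st.1) =
      cs ++ [(k, blk ++ body.takeWhile (fun l => !pvIsBoundary l))]
        ++ pvBlocks (body.dropWhile (fun l => !pvIsBoundary l)) := by
  induction body with
  | nil => intro cs k blk; simp [pvBlocks]
  | cons x rest ih =>
    intro cs k blk
    by_cases hx : pvIsBoundary x = true
    · simp only [List.foldl_cons]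
      rw [show pvStepA (cs, some k, blk) x = (cs ++ [(k, blk)], some (pvKey x), [x]) by
        simp [pvStepA, hx]]
      rw [ih (cs ++ [(k, blk)]) (pvKey x) [x]]
      simp [pvBlocks, hx]
    · simp only [List.foldl_cons]
      rw [show pvStepA (cs, some k, blk) x = (cs, some k, blk ++ [x]) by
        simp [pvStepA, hx]]
      rw [ih cs k (blk ++ [x])]
      simp [hx]

-- ===== VERDICT (by name: the statement is the Claim_ definition above) =====
theorem split_command_children_spec : Claim_equal_split_command_children := by
  intro section_lines _ hpre
  unfold Spec_split_command_children
  match section_lines with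
  | [] => exact absurd rfl hpre
  | header :: body =>
    unfold split_command_children split_command_children_alt
    simp only
    cases body with
    | nil => simp [pvBlocks]
    | cons x rest =>
      by_cases hx : pvIsBoundary x = true
      · simp only [List.foldl_cons]
        rw [show pvStepA ([], none, []) x = ([], some (pvKey x), [x]) by
          simp [pvStepA, hx]]
        rw [foldlA_some rest [] (pvKey x) [x]]
        simp [pvBlocks, hx]
      · simp only [List.foldl_cons]
        rw [show pvStepA ([], none, []) x = ([], some "__loose__", [x]) by
          simp [pvStepA, hx]]
        rw [foldlA_some rest [] "__loose__" [x]]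
        simp [hx]
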